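-- pv_equiv track=rewrite | github.com/trjrhb/BoothsAlgorithm | main.py | circular_rotate_right
-- ===== SOURCE A (Python) =====
-- def circular_rotate_right(accum, binary):
--     accum_temp = []
--     bin_temp = []
--
--     for cur_index in range(len(accum)):
--         rotate_to = (cur_index - 1) % len(accum)
--         accum_temp.append(accum[rotate_to])
--
--     for cur_index in range(len(binary)):
--         rotate_to = (cur_index - 1) % len(binary)
--         bin_temp.append(binary[rotate_to])
--
--     accum_temp[0], bin_temp[0] = bin_temp[0], accum_temp[0]
--     return accum_temp, bin_temp
-- ===== SOURCE B (Python) =====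
-- def circular_rotate_right(accum, binary):
--     accum_temp = accum[-1:] + accum[:-1]
--     bin_temp = binary[-1:] + binary[:-1]
--     accum_temp[0], bin_temp[0] = bin_temp[0], accum_temp[0]
--     return accum_temp, bin_temp
-- ===== Notes on version B (the rewrite author's own statement) =====
-- stated objective: idiomatic
-- what changed: Replaces the two per-index modular-arithmetic loops with a closed-form slice build (xs[-1:] + xs[:-1]) of each rotated list, keeping the first-element swap.
import Mathlib
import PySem

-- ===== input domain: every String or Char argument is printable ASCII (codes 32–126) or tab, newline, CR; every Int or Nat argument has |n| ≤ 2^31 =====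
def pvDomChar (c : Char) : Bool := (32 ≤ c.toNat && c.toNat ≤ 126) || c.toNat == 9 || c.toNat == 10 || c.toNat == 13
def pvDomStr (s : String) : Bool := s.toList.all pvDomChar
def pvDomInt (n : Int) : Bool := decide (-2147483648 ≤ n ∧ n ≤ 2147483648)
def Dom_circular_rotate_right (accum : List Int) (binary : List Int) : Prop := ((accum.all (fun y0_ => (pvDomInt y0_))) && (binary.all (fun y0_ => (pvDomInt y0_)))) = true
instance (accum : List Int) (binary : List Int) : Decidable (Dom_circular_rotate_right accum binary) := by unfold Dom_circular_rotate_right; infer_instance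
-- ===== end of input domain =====

-- B replaces the two modular-index loops with a closed-form slice build (xs[-1:] + xs[:-1]); same swap, same values (idiomatic, not faster).


-- ===== PORT A =====
-- loops: append accum[(i-1) % len] for i in range(len); pyGetD's default is never used: (i-1) % len is in range (Pre_ excludes empty lists, where the final [0] swap raises)
def circular_rotate_right (accum : List Int) (binary : List Int) : List Int × List Int :=
  let accum_temp := (PySem.List.pyRange 0 accum.length 1).foldl
    (fun acc i => acc ++ [PySem.List.pyGetD accum (PySem.Int.mod (i - 1) accum.length) 0]) []
  let bin_temp := (PySem.List.pyRange 0 binary.length 1).foldl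
    (fun acc i => acc ++ [PySem.List.pyGetD binary (PySem.Int.mod (i - 1) binary.length) 0]) []
  -- accum_temp[0], bin_temp[0] = bin_temp[0], accum_temp[0]  (RHS read first; [0] raises on empty — excluded by Pre_)
  let a0 := PySem.List.pyGetD bin_temp 0 0
  let b0 := PySem.List.pyGetD accum_temp 0 0
  (PySem.List.pySetD accum_temp 0 a0, PySem.List.pySetD bin_temp 0 b0)

-- ===== PORT B =====
def circular_rotate_right_alt (accum : List Int) (binary : List Int) : List Int × List Int :=
  let accum_temp := PySem.List.slice accum (some (-1)) none ++ PySem.List.slice accum none (some (-1))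
  let bin_temp := PySem.List.slice binary (some (-1)) none ++ PySem.List.slice binary none (some (-1))
  let a0 := PySem.List.pyGetD bin_temp 0 0
  let b0 := PySem.List.pyGetD accum_temp 0 0
  (PySem.List.pySetD accum_temp 0 a0, PySem.List.pySetD bin_temp 0 b0)

-- ===== PRECONDITION & SPEC =====
-- Pre_ excludes exactly the inputs where Python A raises IndexError: an empty accum or empty binary (the final [0] swap).
def Pre_circular_rotate_right (accum : List Int) (binary : List Int) : Prop := accum ≠ [] ∧ binary ≠ []
instance (accum : List Int) (binary : List Int) : Decidable (Pre_circular_rotate_right accum binary) := by unfold Pre_circular_rotate_right; infer_instance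
def pvWitness_circular_rotate_right : List Int × List Int := ([1, 0, 1], [0, 1])
def Spec_circular_rotate_right (accum : List Int) (binary : List Int) (out : List Int × List Int) : Prop := out = circular_rotate_right_alt accum binary
instance (accum : List Int) (binary : List Int) (out : List Int × List Int) : Decidable (Spec_circular_rotate_right accum binary out) := by unfold Spec_circular_rotate_right; infer_instance

-- ===== CLAIM (what is proved, stated in full; the proofs are below) =====
def Claim_equal_circular_rotate_right : Prop := ∀ (accum : List Int) (binary : List Int), Dom_circular_rotate_right accum binary → Pre_circular_rotate_right accum binary → Spec_circular_rotate_right accum binary (circular_rotate_right accum binary)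

-- ===== LEMMAS AND PROOFS =====

-- A's modular-index loop over a nonempty list builds exactly B's slice concatenation xs[-1:] + xs[:-1].
theorem rotate_loop_eq_slice (xs : List Int) (hxs : xs ≠ []) :
    (PySem.List.pyRange 0 xs.length 1).foldl
      (fun acc i => acc ++ [PySem.List.pyGetD xs (PySem.Int.mod (i - 1) xs.length) 0]) []
    = PySem.List.slice xs (some (-1)) none ++ PySem.List.slice xs none (some (-1)) := by
  have hn : 0 < xs.length := List.length_pos_iff.mpr hxs
  rw [PySem.List.foldl_append_singleton_eq_map, PySem.List.slice_from_neg_one,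
    PySem.List.slice_to_neg_one, PySem.List.pyRange_one]
  simp only [sub_zero, Int.toNat_natCast, zero_add]
  have hdroplen : (List.drop (xs.length - 1) xs).length = 1 := by simp; omega
  apply List.ext_getElem
  · simp [hdroplen]; omega
  · intro j hj hj'
    have hjlen : j < xs.length := by simpa using hj
    have hpos : (0:Int) < (xs.length : Int) := by exact_mod_cast hn
    simp only [List.nil_append, List.map_map, Function.comp_def, List.getElem_map,
      List.getElem_range]
    rw [PySem.Int.mod_eq_emod_of_pos hpos]
    rcases Nat.eq_zero_or_pos j with hj0 | hjpos
    · subst hj0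
      have hmod0 : (((0:Nat):Int) - 1) % (xs.length:Int) = (xs.length:Int) - 1 := by
        rw [show ((0:Nat):Int) - 1 = ((xs.length:Int) - 1) - xs.length by push_cast; ring,
          Int.sub_emod_right]
        exact Int.emod_eq_of_lt (by omega) (by omega)
      rw [hmod0, PySem.List.pyGetD_eq_getElem xs 0 (by omega) (by omega),
        List.getElem_append_left (by omega)]
      rw [List.getElem_drop]
      congr 1
      omega
    · have hmod : ((j:Int) - 1) % (xs.length:Int) = (j:Int) - 1 :=
        Int.emod_eq_of_lt (by omega) (by omega)
      rw [hmod, PySem.List.pyGetD_eq_getElem xs 0 (by omega) (by omega),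
        List.getElem_append_right (by omega)]
      rw [List.getElem_dropLast]
      congr 1
      omega

-- ===== VERDICT (by name: the statement is the Claim_ definition above) =====
theorem circular_rotate_right_spec : Claim_equal_circular_rotate_right := by
  intro accum binary _ hpre
  unfold Spec_circular_rotate_right circular_rotate_right circular_rotate_right_alt
  rw [rotate_loop_eq_slice accum hpre.1, rotate_loop_eq_slice binary hpre.2]
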